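-- pv_equiv track=rewrite | github.com/alxwen711/contestSubmissionArchive | codeforces/live contests/2025-3/1033/e.py | f
-- ===== SOURCE A (Python) =====
-- def f(n,k,ar,x,s): # is moving the xth furthest car to xth closest empty viable
--
--     # find the xth furthest car
--     low = 1
--     high = ar[-1]
--     while high-low > 1:
--         mid = (low+high)//2
--         r = s
--         for i in ar:
--             r -= min(i,mid)
--         if r >= x: low = mid
--         else: high = mid
--     pos = low
--     r = s
--     for i in ar:
--         r -= min(i,low)
--     if r >= x: pos = high
--
--     # det if xth closest spot actually saves time
--     req = pos-k-1
--     snth = 0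
--     for u in ar:
--         if u >= req: break
--         snth += req-u
--     if snth >= x: return pos
--     return -1
-- ===== SOURCE B (Python) =====
-- def f(n, k, ar, x, s):
--     # Same result as A; the O(n) scan per binary-search step is replaced by
--     # prefix sums over a sorted copy + an O(log n) bisection.
--     sa = sorted(ar)
--     pre = [0]
--     for v in sa:
--         pre.append(pre[-1] + v)
--     m = len(ar)
--
--     def bisect_right(v):  # insertion point: number of elements of sa <= v
--         lo, hi = 0, m
--         while lo < hi:
--             mid = (lo + hi) // 2
--             if sa[mid] <= v:
--                 lo = mid + 1
--             else:
--                 hi = mid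
--         return lo
--
--     def moved(mid):  # == s - sum(min(i, mid) for i in ar)
--         j = bisect_right(mid)
--         return s - (pre[j] + (m - j) * mid)
--
--     low, high = 1, ar[-1]
--     while high - low > 1:
--         mid = (low + high) // 2
--         if moved(mid) >= x:
--             low = mid
--         else:
--             high = mid
--     pos = high if moved(low) >= x else low
--
--     req = pos - k - 1
--     j = next((i for i, u in enumerate(ar) if u >= req), m)
--     snth = req * j - sum(ar[:j])
--     return pos if snth >= x else -1
-- ===== Notes on version B (the rewrite author's own statement) =====
-- stated objective: faster
-- what changed: Each binary-search step's O(n) rescan of ar (sum of min(i,mid)) is replaced by a one-time sort + prefix-sum table queried with an O(log n) bisection, and the final break-loop is replaced by a closed-form req*j - sum(ar[:j]) at the first index j with ar[j] >= req.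
import Mathlib
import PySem

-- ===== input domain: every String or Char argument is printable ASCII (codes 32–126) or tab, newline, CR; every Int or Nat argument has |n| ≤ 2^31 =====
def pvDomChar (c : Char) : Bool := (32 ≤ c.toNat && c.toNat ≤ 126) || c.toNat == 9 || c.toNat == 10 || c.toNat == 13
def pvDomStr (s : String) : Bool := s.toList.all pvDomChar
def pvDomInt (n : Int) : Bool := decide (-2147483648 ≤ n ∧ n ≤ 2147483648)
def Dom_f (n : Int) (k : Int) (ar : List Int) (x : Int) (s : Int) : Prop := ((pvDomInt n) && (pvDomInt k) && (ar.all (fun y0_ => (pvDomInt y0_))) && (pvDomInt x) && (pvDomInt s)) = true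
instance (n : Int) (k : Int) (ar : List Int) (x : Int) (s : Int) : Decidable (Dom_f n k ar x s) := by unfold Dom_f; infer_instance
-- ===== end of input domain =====

-- B replaces A's O(n)-per-step rescans by a sorted prefix-sum table + bisection; return values agree on all non-empty ar.

-- ===== PORT A =====
-- r = s; for i in ar: r -= min(i, mid)
def fA_sub (s : Int) (mid : Int) (ar : List Int) : Int :=
  ar.foldl (fun r i => r - min i mid) s

-- the while-loop: while high-low > 1: mid = (low+high)//2; …
def fA_loop (ar : List Int) (x : Int) (s : Int) (low : Int) (high : Int) : Int × Int :=
  if high - low > 1 then    -- mid = (low + high) // 2, inlined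
    if fA_sub s (PySem.Int.floordiv (low + high) 2) ar ≥ x then
      fA_loop ar x s (PySem.Int.floordiv (low + high) 2) high
    else fA_loop ar x s low (PySem.Int.floordiv (low + high) 2)
  else (low, high)
termination_by (high - low).toNat
decreasing_by
  all_goals
    rw [PySem.Int.floordiv_eq_ediv_of_pos (by norm_num)] at *
    omega

-- snth accumulation with break at the first u ≥ req
def fA_snth (req : Int) : List Int → Int → Int
  | [], acc => acc
  | u :: t, acc => if u ≥ req then acc else fA_snth req t (acc + (req - u))

def f (n : Int) (k : Int) (ar : List Int) (x : Int) (s : Int) : Int :=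
  match PySem.List.pyGet? ar (-1) with
  | none => 0   -- ar = []: Python raises IndexError here; excluded by Pre_f
  | some h0 =>
    let lh := fA_loop ar x s 1 h0
    let pos := if fA_sub s lh.1 ar ≥ x then lh.2 else lh.1
    let req := pos - k - 1
    let snth := fA_snth req ar 0
    if snth ≥ x then pos else -1

-- ===== PORT B =====
-- hand-written bisect_right of Source B (binary search on indices), step for step
def fB_bisect (sa : List Int) (v : Int) (lo : Nat) (hi : Nat) : Nat :=
  if lo < hi then    -- mid = (lo + hi) // 2, inlined
    if sa.getD ((lo + hi) / 2) 0 ≤ v then fB_bisect sa v ((lo + hi) / 2 + 1) hi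
    else fB_bisect sa v lo ((lo + hi) / 2)
  else lo
termination_by hi - lo
decreasing_by all_goals omega

-- moved(mid) = s - (pre[j] + (m - j) * mid)
def fB_moved (sa : List Int) (pre : List Int) (m : Nat) (s : Int) (v : Int) : Int :=
  -- j = bisect_right(v), inlined
  s - (pre.getD (fB_bisect sa v 0 m) 0 + ((m : Int) - ((fB_bisect sa v 0 m) : Int)) * v)

def fB_loop (sa : List Int) (pre : List Int) (m : Nat) (x : Int) (s : Int) (low : Int) (high : Int) : Int × Int :=
  if high - low > 1 then    -- mid = (low + high) // 2, inlined
    if fB_moved sa pre m s (PySem.Int.floordiv (low + high) 2) ≥ x then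
      fB_loop sa pre m x s (PySem.Int.floordiv (low + high) 2) high
    else fB_loop sa pre m x s low (PySem.Int.floordiv (low + high) 2)
  else (low, high)
termination_by (high - low).toNat
decreasing_by
  all_goals
    rw [PySem.Int.floordiv_eq_ediv_of_pos (by norm_num)] at *
    omega

def f_alt (n : Int) (k : Int) (ar : List Int) (x : Int) (s : Int) : Int :=
  let sa := PySem.List.sorted ar (fun a => a) false
  let pre := List.scanl (· + ·) 0 sa        -- pre = [0]; for v in sa: pre.append(pre[-1]+v)
  let m := ar.length
  match PySem.List.pyGet? ar (-1) with
  | none => 0   -- ar = []: Source B raises IndexError at ar[-1] too; excluded by Pre_f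
  | some h0 =>
    let lh := fB_loop sa pre m x s 1 h0
    let pos := if fB_moved sa pre m s lh.1 ≥ x then lh.2 else lh.1
    let req := pos - k - 1
    let j := ar.findIdx (fun u => decide (u ≥ req))   -- next((i for i,u in enumerate(ar) if u >= req), m)
    let snth := req * (j : Int) - (ar.take j).sum
    if snth ≥ x then pos else -1

-- ===== PRECONDITION & SPEC =====
-- Pre_f excludes only ar = [], on which both Pythons raise IndexError at ar[-1].
def Pre_f (n : Int) (k : Int) (ar : List Int) (x : Int) (s : Int) : Prop := ar ≠ []
instance (n : Int) (k : Int) (ar : List Int) (x : Int) (s : Int) : Decidable (Pre_f n k ar x s) := by unfold Pre_f; infer_instance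
def pvWitness_f : Int × Int × List Int × Int × Int := (3, 1, [1, 2, 3], 2, 6)

def Spec_f (n : Int) (k : Int) (ar : List Int) (x : Int) (s : Int) (out : Int) : Prop := out = f_alt n k ar x s
instance (n : Int) (k : Int) (ar : List Int) (x : Int) (s : Int) (out : Int) : Decidable (Spec_f n k ar x s out) := by unfold Spec_f; infer_instance

-- ===== CLAIM (what is proved, stated in full; the proofs are below) =====
def Claim_equal_f : Prop := ∀ (n : Int) (k : Int) (ar : List Int) (x : Int) (s : Int), Dom_f n k ar x s → Pre_f n k ar x s → Spec_f n k ar x s (f n k ar x s)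

-- ===== LEMMAS AND PROOFS =====

-- L1: A's subtraction loop is s minus the sum of the clamped values
theorem fA_sub_eq (ar : List Int) (s v : Int) :
    fA_sub s v ar = s - (ar.map (fun i => min i v)).sum := by
  induction ar generalizing s with
  | nil => simp [fA_sub]
  | cons a t ih =>
    simp only [fA_sub, List.foldl_cons, List.map_cons, List.sum_cons] at *
    rw [ih]; ring

-- L2: sum of min i v = sum of the elements ≤ v plus v times the count of the rest
theorem sum_min_split (l : List Int) (v : Int) :
    (l.map (fun i => min i v)).sum
      = (l.filter (fun i => decide (i ≤ v))).sum
        + ((l.length : Int) - (l.countP (fun i => decide (i ≤ v)) : Int)) * v := by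
  induction l with
  | nil => simp
  | cons a t ih =>
    by_cases h : a ≤ v
    · simp [h, ih]; ring
    · have hv : v < a := lt_of_not_ge h
      simp only [List.map_cons, List.sum_cons, List.filter_cons, List.countP_cons,
        List.length_cons, h, decide_false]
      rw [min_eq_right (le_of_lt hv), ih]
      push_cast; ring

-- L4: on a ≤-sorted list, the elements ≤ v are exactly the first countP of them
theorem filter_eq_take_countP (l : List Int) (v : Int)
    (hs : l.Pairwise (· ≤ ·)) :
    l.filter (fun i => decide (i ≤ v)) = l.take (l.countP (fun i => decide (i ≤ v))) := by
  induction l with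
  | nil => simp
  | cons a t ih =>
    rcases List.pairwise_cons.1 hs with ⟨ha, ht⟩
    by_cases h : a ≤ v
    · simp [h, ih ht]
    · have hcz : t.countP (fun i => decide (i ≤ v)) = 0 := by
        rw [List.countP_eq_zero]
        intro b hb
        simp only [decide_eq_true_eq]
        have := ha b hb; omega
      have hfz : t.filter (fun i => decide (i ≤ v)) = [] := by
        rw [List.filter_eq_nil_iff]
        intro b hb
        simp only [decide_eq_true_eq]
        have := ha b hb; omega
      simp [h, hcz, hfz]

-- L5: the prefix-sum list built by scanl, indexed with getD
theorem scanl_getD (l : List Int) (b : Int) (j : Nat) (hj : j ≤ l.length) :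
    (List.scanl (· + ·) b l).getD j 0 = b + (l.take j).sum := by
  induction l generalizing b j with
  | nil =>
    have hj0 : j = 0 := by simpa using hj
    subst hj0; simp
  | cons a t ih =>
    cases j with
    | zero => simp
    | succ j' =>
      simp only [List.scanl_cons, List.getD_cons_succ, List.take_succ_cons, List.sum_cons]
      rw [ih (b + a) j' (by simpa using hj)]; ring

-- countP from an index characterization (no order assumption)
theorem countP_eq_of_bounds (l : List Int) (p : Int → Bool) (j : Nat) (hj : j ≤ l.length)
    (h1 : ∀ i (h : i < l.length), i < j → p l[i])
    (h2 : ∀ i (h : i < l.length), j ≤ i → ¬ p l[i]) :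
    l.countP p = j := by
  have hsplit : l = l.take j ++ l.drop j := (List.take_append_drop j l).symm
  rw [hsplit, List.countP_append]
  have ht : (l.take j).countP p = j := by
    rw [List.countP_eq_length.2, List.length_take]
    · omega
    · intro b hb
      rcases List.mem_take_iff_getElem.1 hb with ⟨i, hi, rfl⟩
      exact h1 i (by omega) (by omega)
  have hd : (l.drop j).countP p = 0 := by
    rw [List.countP_eq_zero]
    intro b hb
    rcases List.mem_iff_getElem.1 hb with ⟨i, hi, rfl⟩
    rw [List.getElem_drop]
    exact h2 (j + i) (by simp at hi; omega) (by omega)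
  omega

-- L6: the hand-written bisection returns countP (· ≤ v) on the sorted list
theorem fB_bisect_inv (ar : List Int) (v : Int) :
    ∀ (lo hi : Nat), lo ≤ hi → hi ≤ (PySem.List.sorted ar (fun a => a) false).length →
    (∀ i (h : i < (PySem.List.sorted ar (fun a => a) false).length), i < lo →
        (PySem.List.sorted ar (fun a => a) false)[i] ≤ v) →
    (∀ i (h : i < (PySem.List.sorted ar (fun a => a) false).length), hi ≤ i →
        ¬ (PySem.List.sorted ar (fun a => a) false)[i] ≤ v) →
    fB_bisect (PySem.List.sorted ar (fun a => a) false) v lo hi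
      = (PySem.List.sorted ar (fun a => a) false).countP (fun i => decide (i ≤ v)) := by
  set sa := PySem.List.sorted ar (fun a => a) false with hsa
  suffices H : ∀ d (lo hi : Nat), hi - lo = d → lo ≤ hi → hi ≤ sa.length →
      (∀ i (h : i < sa.length), i < lo → sa[i] ≤ v) →
      (∀ i (h : i < sa.length), hi ≤ i → ¬ sa[i] ≤ v) →
      fB_bisect sa v lo hi = sa.countP (fun i => decide (i ≤ v)) by
    exact fun lo hi a b c d => H (hi - lo) lo hi rfl a b c d
  intro d
  induction d using Nat.strong_induction_on with
  | _ d ih =>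
  intro lo hi hd hle hhi h1 h2
  rw [fB_bisect]
  by_cases hlt : lo < hi
  · rw [if_pos hlt]
    have hmlt : (lo + hi) / 2 < hi := by omega
    have hmlo : lo ≤ (lo + hi) / 2 := by omega
    have hmlen : (lo + hi) / 2 < sa.length := by omega
    rw [List.getD_eq_getElem sa 0 hmlen]
    by_cases hcmp : sa[(lo + hi) / 2] ≤ v
    · rw [if_pos hcmp]
      refine ih (hi - ((lo + hi) / 2 + 1)) (by omega) ((lo + hi) / 2 + 1) hi rfl (by omega) hhi ?_ h2
      intro i hil hi'
      by_cases hio : i < lo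
      · exact h1 i hil hio
      · exact le_trans (PySem.List.sorted_id_getElem_mono ar (by omega) hmlen) hcmp
    · rw [if_neg hcmp]
      refine ih ((lo + hi) / 2 - lo) (by omega) lo ((lo + hi) / 2) rfl hmlo (by omega) h1 ?_
      intro i hil hmi hiv
      exact hcmp (le_trans (PySem.List.sorted_id_getElem_mono ar hmi hil) hiv)
  · rw [if_neg hlt]
    have hlohi : lo = hi := by omega
    refine (countP_eq_of_bounds sa _ lo (by omega)
      (fun i h hi' => decide_eq_true (h1 i h hi'))
      (fun i h hi' hp => h2 i h (by omega) (of_decide_eq_true hp))).symm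

theorem fB_bisect_eq (ar : List Int) (v : Int) :
    fB_bisect (PySem.List.sorted ar (fun a => a) false) v 0 ar.length
      = (PySem.List.sorted ar (fun a => a) false).countP (fun i => decide (i ≤ v)) := by
  have hlen : (PySem.List.sorted ar (fun a => a) false).length = ar.length :=
    (PySem.List.sorted_perm ar (fun a => a) false).length_eq
  rw [← hlen]
  exact fB_bisect_inv ar v 0 _ (Nat.zero_le _) le_rfl
    (fun i h hi' => absurd hi' (by omega))
    (fun i h hi' => absurd h (by omega))

-- the central bridge: B's table lookup computes A's rescan
theorem moved_eq (ar : List Int) (s v : Int) :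
    fB_moved (PySem.List.sorted ar (fun a => a) false)
        (List.scanl (· + ·) 0 (PySem.List.sorted ar (fun a => a) false))
        ar.length s v
      = fA_sub s v ar := by
  have hperm : (PySem.List.sorted ar (fun a => a) false).Perm ar :=
    PySem.List.sorted_perm ar (fun a => a) false
  have hlen : (PySem.List.sorted ar (fun a => a) false).length = ar.length := hperm.length_eq
  unfold fB_moved
  rw [fA_sub_eq, fB_bisect_eq]
  have hcle : (PySem.List.sorted ar (fun a => a) false).countP (fun i => decide (i ≤ v))
      ≤ (PySem.List.sorted ar (fun a => a) false).length := List.countP_le_length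
  rw [scanl_getD _ _ _ hcle,
    ← filter_eq_take_countP _ v (PySem.List.sorted_pairwise ar (fun a => a))]
  have hsum : (ar.map (fun i => min i v)).sum
      = ((PySem.List.sorted ar (fun a => a) false).map (fun i => min i v)).sum :=
    (List.Perm.sum_eq (hperm.map _)).symm
  rw [hsum, sum_min_split _ v, hlen]
  ring

-- both while-loops compute the same pair
theorem loop_eq (ar : List Int) (x s : Int) : ∀ (low high : Int),
    fA_loop ar x s low high
      = fB_loop (PySem.List.sorted ar (fun a => a) false)
          (List.scanl (· + ·) 0 (PySem.List.sorted ar (fun a => a) false))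
          ar.length x s low high := by
  suffices H : ∀ d (low high : Int), (high - low).toNat = d →
      fA_loop ar x s low high
        = fB_loop (PySem.List.sorted ar (fun a => a) false)
            (List.scanl (· + ·) 0 (PySem.List.sorted ar (fun a => a) false))
            ar.length x s low high by
    exact fun low high => H _ low high rfl
  intro d
  induction d using Nat.strong_induction_on with
  | _ d ih =>
  intro low high hd
  rw [fA_loop, fB_loop, moved_eq]
  by_cases h : high - low > 1
  · rw [if_pos h, if_pos h]
    have hdiv : PySem.Int.floordiv (low + high) 2 = (low + high) / 2 :=
      PySem.Int.floordiv_eq_ediv_of_pos (by norm_num)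
    by_cases hc : fA_sub s (PySem.Int.floordiv (low + high) 2) ar ≥ x
    · rw [if_pos hc, if_pos hc]
      exact ih _ (by rw [hdiv] at *; omega) _ high rfl
    · rw [if_neg hc, if_neg hc]
      exact ih _ (by rw [hdiv] at *; omega) low _ rfl
  · rw [if_neg h, if_neg h]

-- A's break-loop in closed form
theorem snth_eq (req : Int) : ∀ (l : List Int) (acc : Int),
    fA_snth req l acc
      = acc + (req * ((l.findIdx (fun u => decide (u ≥ req))) : Int)
               - (l.take (l.findIdx (fun u => decide (u ≥ req)))).sum) := by
  intro l
  induction l with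
  | nil => intro acc; simp [fA_snth]
  | cons u t ih =>
    intro acc
    by_cases h : u ≥ req
    · simp [fA_snth, List.findIdx_cons, h]
    · simp only [fA_snth, h, if_false]
      rw [ih]
      simp only [List.findIdx_cons, h, decide_false, cond_false, List.take_succ_cons,
        List.sum_cons]
      push_cast
      ring

-- ===== VERDICT (by name: the statement is the Claim_ definition above) =====
theorem f_spec : Claim_equal_f := by
  intro n k ar x s hdom hpre
  unfold Spec_f f f_alt
  cases hx : PySem.List.pyGet? ar (-1) with
  | none => rfl
  | some h0 =>
    simp only [← loop_eq, moved_eq, snth_eq]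
    ring_nf
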